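-- pv_equiv track=rewrite | github.com/DReichLab/adna-workflow | pulldown_split_bam_list.py | split_pulldowns
-- ===== SOURCE A (Python) =====
-- def split_pulldowns(instances_to_libraries, minimum_splits=1):
-- 	# construct a list of instances that each library appears in
-- 	library_id_to_instance = {}
-- 	for instance_id in instances_to_libraries:
-- 		for library_id in instances_to_libraries[instance_id]:
-- 			# make a blank list if first appearance of library_id
-- 			if library_id not in library_id_to_instance:
-- 				library_id_to_instance[library_id] = []
-- 			# add instance to list
-- 			library_id_to_instance[library_id].append(instance_id)
--
-- 	# To pass read group checks, we need each read group to appear at most once in each pulldown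
-- 	num_pulldowns = max([len(library_id_to_instance[library_id]) for library_id in library_id_to_instance])
-- 	num_pulldowns = max(num_pulldowns, minimum_splits)
-- 	# setup enough blank lists to accomodate the most frequent library
-- 	# we could also increase this for parallelization
-- 	pulldown_instances = []
-- 	for x in range(num_pulldowns):
-- 		pulldown_instances.append([])
-- 	count = 0
-- 	# divide instances among num_pulldowns
-- 	# no library will appear in a pulldown twice
-- 	used_instances = set()
-- 	for library_id, instance_list in library_id_to_instance.items():
-- 		for instance in instance_list:
-- 			if instance not in used_instances:
-- 				pulldown_instances[count % num_pulldowns].append(instance)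
-- 				count += 1
-- 				used_instances.add(instance)
-- 	return pulldown_instances
-- ===== SOURCE B (Python) =====
-- def split_pulldowns(instances_to_libraries, minimum_splits=1):
-- 	# group: library_id -> list of instances containing it (insertion order)
-- 	index = {}
-- 	for instance_id, library_ids in instances_to_libraries.items():
-- 		for library_id in library_ids:
-- 			index.setdefault(library_id, []).append(instance_id)
-- 	# one pulldown per occurrence of the most frequent library (at least minimum_splits)
-- 	num_pulldowns = max(max(len(v) for v in index.values()), minimum_splits)
-- 	# instances in order of first appearance in the grouping
-- 	ordered = []
-- 	seen = set()
-- 	for instance_list in index.values():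
-- 		for instance in instance_list:
-- 			if instance not in seen:
-- 				seen.add(instance)
-- 				ordered.append(instance)
-- 	# round-robin assignment = strided slices
-- 	return [ordered[j::num_pulldowns] for j in range(num_pulldowns)]
-- ===== Notes on version B (the rewrite author's own statement) =====
-- stated objective: simpler
-- what changed: B drops A's mutable bucket array with a running counter and interleaved dedup: it builds one ordered duplicate-free instance list and returns the strided slices ordered[j::num_pulldowns], which realise the round-robin assignment directly.
-- outside the precondition, e.g. on split_pulldowns({}, 1): A raises ValueError, B raises ValueError
import Mathlib
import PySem

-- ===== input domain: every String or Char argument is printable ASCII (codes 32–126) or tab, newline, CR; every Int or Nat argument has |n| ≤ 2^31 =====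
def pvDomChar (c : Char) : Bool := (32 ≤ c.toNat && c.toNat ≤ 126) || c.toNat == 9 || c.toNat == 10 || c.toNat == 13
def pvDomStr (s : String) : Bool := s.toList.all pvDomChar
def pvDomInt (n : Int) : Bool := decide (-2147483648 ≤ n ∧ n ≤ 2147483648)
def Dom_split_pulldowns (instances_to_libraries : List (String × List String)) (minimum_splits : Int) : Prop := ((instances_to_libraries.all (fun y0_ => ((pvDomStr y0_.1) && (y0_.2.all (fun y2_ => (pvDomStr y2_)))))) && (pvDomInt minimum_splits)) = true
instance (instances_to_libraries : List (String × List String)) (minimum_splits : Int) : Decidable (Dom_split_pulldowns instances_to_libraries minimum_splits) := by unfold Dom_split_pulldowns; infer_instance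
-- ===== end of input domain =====

-- B replaces A's mutable bucket array + running counter + interleaved dedup by one ordered
-- dedup pass followed by strided slices ordered[j::num_pulldowns] (objective: simpler).

-- ===== PORT A =====
-- The dict parameter arrives as an association list; Python builds the dict from it
-- (duplicate keys collapse, last value wins, first position kept) = PySem.Dict.ofList.
def split_pulldowns (instances_to_libraries : List (String × List String)) (minimum_splits : Int) : List (List String) :=
  let d := PySem.Dict.ofList instances_to_libraries
  -- library_id_to_instance: membership test, blank-list insert, in-place append
  let idx : PySem.Dict String (List String) :=
    d.items.foldl (fun idx p =>
      p.2.foldl (fun idx lib =>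
        (if idx.contains lib then idx else idx.insert lib []).modify lib []
          (fun l => l ++ [p.1])) idx) PySem.Dict.empty
  -- max([len(idx[lib]) for lib in idx]); lib ∈ keys so idx[lib] = getD lib [] (no KeyError)
  match PySem.List.max? (idx.keys.map (fun k => (((idx.getD k []).length : Int)))) (fun y => y) with
  | none => []  -- max([]) raises ValueError: excluded by Pre_split_pulldowns
  | some m =>
    let n := max m minimum_splits
    let buckets : List (List String) :=
      (PySem.List.pyRange 0 n 1).foldl (fun acc _ => acc ++ [([] : List String)]) []
    -- state (pulldown_instances, count, used_instances); count % n is ≥ 0 so toNat is exact,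
    -- and < len(buckets) so List.modify is Python's in-place append at that index
    let st :=
      idx.items.foldl (fun st p =>
        p.2.foldl (fun (st : List (List String) × Int × PySem.Set String) inst =>
          if PySem.Set.contains st.2.2 inst then st
          else (st.1.modify (PySem.Int.mod st.2.1 n).toNat (fun b => b ++ [inst]),
                st.2.1 + 1, PySem.Set.add st.2.2 inst)) st)
        (buckets, (0 : Int), PySem.Set.empty)
    st.1

-- ===== PORT B =====
-- ordered[j::step] for 0 ≤ j ≤ len, 1 ≤ step (exact there: stop omitted, positive step)
def pvEveryNth (step : Nat) : List String → List String
  | [] => []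
  | x :: t => x :: pvEveryNth step (t.drop (step - 1))
  termination_by l => l.length
  decreasing_by simp

def split_pulldowns_alt (instances_to_libraries : List (String × List String)) (minimum_splits : Int) : List (List String) :=
  let d := PySem.Dict.ofList instances_to_libraries
  -- index.setdefault(library_id, []).append(instance_id)  =  index[lib] = index.get(lib, []) + [inst]
  -- keeping the key's position = PySem.Dict.modify
  let idx : PySem.Dict String (List String) :=
    d.items.foldl (fun idx p =>
      p.2.foldl (fun idx lib => idx.modify lib [] (fun l => l ++ [p.1])) idx) PySem.Dict.empty
  match PySem.List.max? (idx.values.map (fun v => ((v.length : Int)))) (fun y => y) with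
  | none => []  -- max() of empty generator raises ValueError: excluded by Pre_split_pulldowns
  | some m =>
    let n := max m minimum_splits
    let ordered :=
      (idx.values.foldl (fun st lst =>
        lst.foldl (fun (st : List String × PySem.Set String) inst =>
          if PySem.Set.contains st.2 inst then st
          else (st.1 ++ [inst], PySem.Set.add st.2 inst)) st) ([], PySem.Set.empty)).1
    (PySem.List.pyRange 0 n 1).map (fun j => pvEveryNth n.toNat (ordered.drop j.toNat))

-- ===== PRECONDITION & SPEC =====
-- Pre_ excludes exactly the inputs whose dict maps every instance to an empty library list
-- (then the library index is empty and A's max([]) raises ValueError; B raises it too).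
def Pre_split_pulldowns (instances_to_libraries : List (String × List String)) (minimum_splits : Int) : Prop :=
  ∃ p ∈ (PySem.Dict.ofList instances_to_libraries).items, p.2 ≠ ([] : List String)
instance (instances_to_libraries : List (String × List String)) (minimum_splits : Int) : Decidable (Pre_split_pulldowns instances_to_libraries minimum_splits) := by unfold Pre_split_pulldowns; infer_instance

def pvWitness_split_pulldowns : (List (String × List String)) × Int := ([("i1", ["L1"])], 1)

def Spec_split_pulldowns (instances_to_libraries : List (String × List String)) (minimum_splits : Int) (out : List (List String)) : Prop := out = split_pulldowns_alt instances_to_libraries minimum_splits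
instance (instances_to_libraries : List (String × List String)) (minimum_splits : Int) (out : List (List String)) : Decidable (Spec_split_pulldowns instances_to_libraries minimum_splits out) := by unfold Spec_split_pulldowns; infer_instance

-- ===== CLAIM (what is proved, stated in full; the proofs are below) =====
def Claim_equal_split_pulldowns : Prop := ∀ (instances_to_libraries : List (String × List String)) (minimum_splits : Int), Dom_split_pulldowns instances_to_libraries minimum_splits → Pre_split_pulldowns instances_to_libraries minimum_splits → Spec_split_pulldowns instances_to_libraries minimum_splits (split_pulldowns instances_to_libraries minimum_splits)

-- ===== LEMMAS AND PROOFS =====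

-- the (library_id, instance_id) stream both phase-1 loops process
def pvFlatPairs (l : List (String × List String)) : List (String × String) :=
  l.flatMap (fun p => p.2.map (fun lib => (lib, p.1)))

def pvDed (seen : PySem.Set String) : List String → List String
  | [] => []
  | x :: t => if PySem.Set.contains seen x then pvDed seen t
              else x :: pvDed (PySem.Set.add seen x) t

def pvDistr (N : Nat) : List (List String) → Nat → List String → List (List String)
  | bs, _, [] => bs
  | bs, c, x :: t => pvDistr N (bs.modify (c % N) (fun b => b ++ [x])) (c + 1) t

-- A's "insert blank then append" step is B's get-default-append step
theorem pv_modify_insert_empty (d : PySem.Dict String (List String)) (k : String)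
    (f : List String → List String) :
    ((if d.contains k then d else d.insert k []).modify k [] f) = d.modify k [] f := by
  by_cases h : d.contains k
  · simp [h]
  · simp only [h, Bool.false_eq_true, if_false]
    rw [PySem.Dict.modify, PySem.Dict.modify, PySem.Dict.getD_insert_self,
      PySem.Dict.insert_insert_self,
      PySem.Dict.getD_of_not_contains d [] (by simpa using h)]

theorem pv_foldl_nested_flat (l : List (String × List String))
    (e : PySem.Dict String (List String)) :
    l.foldl (fun idx p =>
      p.2.foldl (fun idx lib => idx.modify lib [] (fun v => v ++ [p.1])) idx) e
    = (pvFlatPairs l).foldl (fun d q => d.modify q.1 [] (fun v => v ++ [q.2])) e := by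
  induction l generalizing e with
  | nil => rfl
  | cons p t ih =>
    rw [List.foldl_cons, ih]
    show _ = List.foldl _ e (pvFlatPairs (p :: t))
    rw [show pvFlatPairs (p :: t) = p.2.map (fun lib => (lib, p.1)) ++ pvFlatPairs t from rfl,
      List.foldl_append, List.foldl_map]

-- a nested loop over the value lists is a loop over their concatenation
theorem pv_foldl_nested_flatten {σ : Type} (l : List (String × List String))
    (g : σ → String → σ) (init : σ) :
    l.foldl (fun st p => p.2.foldl g st) init
    = (l.map (fun p => p.2)).flatten.foldl g init := by
  induction l generalizing init with
  | nil => rfl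
  | cons p t ih => simp only [List.foldl_cons, List.map_cons, List.flatten_cons, List.foldl_append, ih]

theorem pv_foldB_spec (l : List String) : ∀ (o : List String) (s : PySem.Set String),
    l.foldl (fun (st : List String × PySem.Set String) inst =>
        if PySem.Set.contains st.2 inst then st
        else (st.1 ++ [inst], PySem.Set.add st.2 inst)) (o, s)
    = (o ++ pvDed s l, l.foldl PySem.Set.add s) := by
  induction l with
  | nil => simp [pvDed]
  | cons x t ih =>
    intro o s
    by_cases h : PySem.Set.contains s x
    · simp only [List.foldl_cons, h, if_pos, pvDed, ih]
      rw [show PySem.Set.add s x = s from by unfold PySem.Set.add; rw [h]; rfl]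
    · simp only [List.foldl_cons, h, pvDed, Bool.false_eq_true, if_false, ih, List.append_assoc,
        List.cons_append, List.nil_append]

theorem pv_foldA_spec (N : Nat) (n : Int) (hn : n = (N : Int)) (l : List String) :
    ∀ (bs : List (List String)) (c : Nat) (s : PySem.Set String),
    l.foldl (fun (st : List (List String) × Int × PySem.Set String) inst =>
        if PySem.Set.contains st.2.2 inst then st
        else (st.1.modify (PySem.Int.mod st.2.1 n).toNat (fun b => b ++ [inst]),
              st.2.1 + 1, PySem.Set.add st.2.2 inst)) (bs, ((c : Int)), s)
    = (pvDistr N bs c (pvDed s l), ((c : Int) + (pvDed s l).length), l.foldl PySem.Set.add s) := by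
  induction l with
  | nil => intro bs c s; simp [pvDed, pvDistr]
  | cons x t ih =>
    intro bs c s
    by_cases h : PySem.Set.contains s x
    · have hadd : PySem.Set.add s x = s := by unfold PySem.Set.add; rw [h]; rfl
      have hded : pvDed s (x :: t) = pvDed s t := by rw [pvDed, if_pos h]
      rw [List.foldl_cons, if_pos h, ih bs c s, hded, List.foldl_cons, hadd]
    · have hded : pvDed s (x :: t) = x :: pvDed (PySem.Set.add s x) t := by
        rw [pvDed, if_neg h]
      have hmod : (PySem.Int.mod ((c : Int)) n).toNat = c % N := by
        rw [hn, PySem.Int.mod_natCast]; omega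
      have hih := ih (bs.modify (c % N) (fun b => b ++ [x])) (c + 1) (PySem.Set.add s x)
      push_cast at hih
      rw [List.foldl_cons, if_neg h, hmod, hded, List.foldl_cons]
      rw [show ((c : Int) + 1) = ((c : Int) + 1) from rfl] at hih
      rw [hih, pvDistr]
      refine Prod.ext rfl (Prod.ext ?_ rfl)
      simp; ring

theorem pv_buckets_init (N : Nat) (n : Int) (hn : n = (N : Int)) :
    (PySem.List.pyRange 0 n 1).foldl (fun acc _ => acc ++ [([] : List String)]) []
    = List.replicate N ([] : List String) := by
  rw [hn, show PySem.List.pyRange 0 (N : Int) 1 = PySem.List.pyRange 0 (N : Int) from rfl,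
    PySem.List.pyRange_zero_natCast, PySem.List.foldl_append_singleton_eq_map (fun _ => ([] : List String))]
  simp [Function.comp_def, List.map_const']

theorem pvDistr_shift (N : Nat) (l : List String) :
    ∀ (bs : List (List String)) (c : Nat), pvDistr N bs (c + N) l = pvDistr N bs c l := by
  induction l with
  | nil => intro bs c; rfl
  | cons x t ih =>
    intro bs c
    rw [pvDistr, pvDistr, Nat.add_mod_right, show c + N + 1 = (c + 1) + N from by omega, ih]

theorem pv_modify_append_cons (pre : List (List String)) (b : List String)
    (suf : List (List String)) (f : List String → List String) :
    (pre ++ b :: suf).modify pre.length f = pre ++ f b :: suf := by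
  induction pre with
  | nil => rfl
  | cons a t ih => simpa [List.modify_succ_cons] using ih

theorem pv_zipWith_left (l : List (List String)) : ∀ (r : List Nat), l.length ≤ r.length →
    List.zipWith (fun b (_ : Nat) => b) l r = l := by
  induction l with
  | nil => intro r _; rfl
  | cons b t ih =>
    intro r hr
    cases r with
    | nil => simp at hr
    | cons j r' => simp only [List.zipWith_cons_cons, ih r' (by simpa using hr)]

theorem pvDistr_round (N : Nat) :
    ∀ (suf pre : List (List String)) (xs : List String),
      (pre ++ suf).length = N →
      pvDistr N (pre ++ suf) pre.length xs
      = pvDistr N (pre ++ (suf.zipWith (fun b j => b ++ (xs.drop j).take 1) (List.range suf.length))) 0 (xs.drop suf.length) := by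
  intro suf
  induction suf with
  | nil =>
    intro pre xs h
    simp only [List.append_nil, List.length_nil, List.range_zero, List.zipWith_nil_right,
      List.drop_zero] at *
    rw [show pre.length = 0 + N from by omega]
    exact pvDistr_shift N xs pre 0
  | cons b suf' ih =>
    intro pre xs h
    cases xs with
    | nil =>
      show pre ++ b :: suf' = pvDistr N _ 0 (List.drop _ [])
      rw [List.drop_nil]
      show pre ++ b :: suf' = pre ++ _
      congr 1
      rw [show (fun (b : List String) (j : Nat) => b ++ (List.drop j ([] : List String)).take 1)
            = (fun (b : List String) (_ : Nat) => b) from by funext b j; simp]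
      exact (pv_zipWith_left _ _ (by simp)).symm
    | cons x t =>
      rw [pvDistr]
      have hlt : pre.length < N := by simp at h; omega
      rw [Nat.mod_eq_of_lt hlt, pv_modify_append_cons]
      have := ih (pre ++ [b ++ [x]]) t (by simpa using by simp at h; omega)
      rw [show pre ++ (b ++ [x]) :: suf' = (pre ++ [b ++ [x]]) ++ suf' from by simp,
        show pre.length + 1 = (pre ++ [b ++ [x]]).length from by simp] at *
      have hbuck : (b ++ [x]) :: List.zipWith (fun b j => b ++ (t.drop j).take 1) suf' (List.range suf'.length)
          = List.zipWith (fun b j => b ++ ((x :: t).drop j).take 1) (b :: suf') (List.range (b :: suf').length) := by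
        conv_rhs => rw [List.length_cons, List.range_succ_eq_map]
        rw [List.zipWith_cons_cons, List.zipWith_map_right]
        simp
      rw [this, List.append_assoc, List.singleton_append, hbuck,
        show List.drop suf'.length t = List.drop (b :: suf').length (x :: t) from by simp]

theorem pvEveryNth_unfold (N : Nat) (hN : 1 ≤ N) (l : List String) :
    pvEveryNth N l = l.take 1 ++ pvEveryNth N (l.drop N) := by
  cases l with
  | nil => simp [pvEveryNth]
  | cons x t =>
    rw [pvEveryNth, List.take_succ_cons, List.take_zero,
      show (x :: t).drop N = t.drop (N - 1) from by cases N with | zero => omega | succ k => simp]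
    rfl

theorem pv_zipWith_append_nil (bs : List (List String)) :
    List.zipWith (· ++ ·) bs (List.replicate bs.length ([] : List String)) = bs := by
  induction bs with
  | nil => rfl
  | cons b t ih => simp [List.replicate_succ, ih]

theorem pv_zipWith_append_assoc (a b c : List (List String)) :
    List.zipWith (· ++ ·) (List.zipWith (· ++ ·) a b) c
    = List.zipWith (· ++ ·) a (List.zipWith (· ++ ·) b c) := by
  induction a generalizing b c with
  | nil => rfl
  | cons x t ih =>
    cases b with
    | nil => rfl
    | cons y u =>
      cases c with
      | nil => rfl
      | cons z v => simp [ih, List.append_assoc]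

theorem pvDistr_strides (N : Nat) (hN : 1 ≤ N) :
    ∀ (xs : List String) (bs : List (List String)), bs.length = N →
      pvDistr N bs 0 xs
      = List.zipWith (· ++ ·) bs ((List.range N).map (fun j => pvEveryNth N (xs.drop j))) := by
  have main : ∀ (len : Nat) (xs : List String), xs.length = len →
      ∀ (bs : List (List String)), bs.length = N →
      pvDistr N bs 0 xs
      = List.zipWith (· ++ ·) bs ((List.range N).map (fun j => pvEveryNth N (xs.drop j))) := by
    intro len
    induction len using Nat.strong_induction_on with
    | h len ih =>
      intro xs hlen bs hbs
      cases xs with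
      | nil =>
        rw [show (List.range N).map (fun j => pvEveryNth N (List.drop j ([] : List String)))
              = List.replicate N [] from by simp [pvEveryNth, List.map_const'], ← hbs,
          pv_zipWith_append_nil]
        rfl
      | cons x t =>
        have h0 := pvDistr_round N bs [] (x :: t) (by simpa using hbs)
        simp only [List.nil_append, List.length_nil] at h0
        rw [h0, hbs]
        have hlt : (List.drop N (x :: t)).length < len := by
          simp at hlen; simp [List.length_drop]; omega
        rw [ih _ hlt (List.drop N (x :: t)) rfl _
          (by simp [List.length_zipWith, hbs])]
        rw [show List.zipWith (fun b j => b ++ (List.drop j (x :: t)).take 1) bs (List.range N)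
              = List.zipWith (· ++ ·) bs ((List.range N).map (fun j => (List.drop j (x :: t)).take 1)) from by
            rw [List.zipWith_map_right]]
        rw [pv_zipWith_append_assoc]
        congr 1
        rw [List.zipWith_map_left, List.zipWith_map_right, List.zipWith_self]
        refine List.map_congr_left (fun j hj => ?_)
        conv_rhs => rw [pvEveryNth_unfold N hN (List.drop j (x :: t)), List.drop_drop]
        rw [List.drop_drop, Nat.add_comm N j]
  intro xs bs hbs
  exact main xs.length xs rfl bs hbs


theorem pv_zipWith_nil_left (L : List (List String)) :
    List.zipWith (· ++ ·) (List.replicate L.length ([] : List String)) L = L := by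
  induction L with
  | nil => rfl
  | cons b t ih => simp [List.replicate_succ, ih]

theorem pv_idx_nodup (fl : List (String × String)) :
    (fl.foldl (fun d q => d.modify q.1 [] (fun v => v ++ [q.2])) PySem.Dict.empty).keys.Nodup :=
  PySem.Dict.nodup_keys_foldl_modify_key fl Prod.fst [] (fun _ q => fun v => v ++ [q.2])
    PySem.Dict.empty PySem.Dict.nodup_keys_empty

theorem pv_idx_keys (fl : List (String × String)) :
    (fl.foldl (fun d q => d.modify q.1 [] (fun v => v ++ [q.2])) PySem.Dict.empty).keys
    = PySem.Set.ofList (fl.map Prod.fst) := by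
  rw [PySem.Dict.keys_foldl_modify_key fl Prod.fst [] (fun _ q => fun v => v ++ [q.2])
    PySem.Dict.empty, PySem.Dict.keys_empty]
  rfl

theorem pv_idx_getD (fl : List (String × String)) (k : String) :
    (fl.foldl (fun d q => d.modify q.1 [] (fun v => v ++ [q.2])) PySem.Dict.empty).getD k []
    = (fl.filter (fun q => q.1 == k)).map (fun q => q.2) := by
  simpa using PySem.Dict.getD_foldl_modify_append fl PySem.Dict.empty k

-- ===== VERDICT (by name: the statement is the Claim_ definition above) =====
theorem split_pulldowns_spec : Claim_equal_split_pulldowns := by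
  intro xs ms hdom hpre
  unfold Spec_split_pulldowns split_pulldowns split_pulldowns_alt
  simp only [pv_modify_insert_empty, pv_foldl_nested_flat]
  set fl := pvFlatPairs (PySem.Dict.ofList xs).items with hfl
  set idx := fl.foldl (fun d q => d.modify q.1 [] (fun v => v ++ [q.2])) PySem.Dict.empty with hidx
  have hLB : List.map (fun v => ((v.length : Int))) idx.values
      = List.map (fun k => (((idx.getD k []).length : Int))) idx.keys := by
    rw [PySem.Dict.values_eq_map_keys idx (pv_idx_nodup fl) [], List.map_map]
    rfl
  rw [hLB]
  cases hmax : PySem.List.max? (List.map (fun k => (((idx.getD k []).length : Int))) idx.keys) (fun y => y) with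
  | none =>
    exfalso
    obtain ⟨p, hp, hne⟩ := hpre
    obtain ⟨y, hy⟩ := List.exists_mem_of_ne_nil p.2 hne
    have hyfl : (y, p.1) ∈ fl := by
      rw [hfl]
      exact List.mem_flatMap.mpr ⟨p, hp, List.mem_map.mpr ⟨y, hy, rfl⟩⟩
    have hkeys : idx.keys = [] := by
      have := (PySem.List.max?_eq_none_iff _ _).mp hmax
      simpa using this
    have : y ∈ idx.keys := by
      rw [hidx, pv_idx_keys, PySem.Set.mem_ofList]
      exact List.mem_map.mpr ⟨(y, p.1), hyfl, rfl⟩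
    rw [hkeys] at this
    exact absurd this (List.not_mem_nil)
  | some m =>
    have hkne : idx.keys ≠ [] := by
      intro h
      rw [h] at hmax
      simp only [List.map_nil, (PySem.List.max?_eq_none_iff ([] : List Int) (fun y => y)).mpr rfl] at hmax
      exact absurd hmax (by simp)
    have hm1 : 1 ≤ m := by
      obtain ⟨k0, hk0⟩ := List.exists_mem_of_ne_nil idx.keys hkne
      have hk0fl : k0 ∈ fl.map Prod.fst := by
        rw [hidx, pv_idx_keys, PySem.Set.mem_ofList] at hk0
        exact hk0
      obtain ⟨q, hq, hq1⟩ := List.mem_map.mp hk0fl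
      have hflt : q ∈ fl.filter (fun q => q.1 == k0) :=
        List.mem_filter.mpr ⟨hq, by simp [hq1]⟩
      have hlen : 1 ≤ (idx.getD k0 []).length := by
        rw [hidx, pv_idx_getD]
        have := List.length_pos_of_mem hflt
        simp only [List.length_map]
        omega
      have hmem : ((( idx.getD k0 []).length : Int)) ∈ List.map (fun k => (((idx.getD k []).length : Int))) idx.keys :=
        List.mem_map.mpr ⟨k0, hk0, rfl⟩
      have := PySem.List.max?_isMax hmax _ hmem
      simp at this
      omega
    have hn0 : (0 : Int) ≤ max m ms := by
      have := le_max_left m ms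
      omega
    have hn : max m ms = ((max m ms).toNat : Int) := (Int.toNat_of_nonneg hn0).symm
    have hN1 : 1 ≤ (max m ms).toNat := by omega
    simp only []
    rw [pv_buckets_init (max m ms).toNat (max m ms) hn]
    have hA := pv_foldA_spec (max m ms).toNat (max m ms) hn idx.values.flatten
      (List.replicate (max m ms).toNat []) 0 PySem.Set.empty
    rw [Nat.cast_zero] at hA
    rw [pv_foldl_nested_flatten,
      show List.map (fun p => p.2) idx.items = idx.values from rfl,
      hA,
      ← List.foldl_flatten,
      pv_foldB_spec idx.values.flatten [] PySem.Set.empty]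
    simp only [List.nil_append]
    rw [pvDistr_strides (max m ms).toNat hN1 (pvDed PySem.Set.empty idx.values.flatten)
        (List.replicate (max m ms).toNat []) (List.length_replicate)]
    rw [show List.replicate (max m ms).toNat ([] : List String)
          = List.replicate ((List.range (max m ms).toNat).map
              (fun j => pvEveryNth (max m ms).toNat ((pvDed PySem.Set.empty idx.values.flatten).drop j))).length ([] : List String) from by
        simp,
      pv_zipWith_nil_left]
    conv_rhs => rw [hn, PySem.List.pyRange_zero_natCast, List.map_map]
    simp only [Function.comp_def, Int.toNat_natCast]
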